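-- pv_equiv track=rewrite | github.com/DaeHee99/Algorithm | 프로그래머스/2/138476. 귤 고르기/귤 고르기.py | solution
-- ===== SOURCE A (Python) =====
-- from collections import Counter
--
-- def solution(k, tangerine):
--     count = 0
--     counter = Counter(tangerine)
--
--     for i, (_, n) in enumerate(counter.most_common()):
--         count += n
--         if count >= k:
--             return i + 1
--
--     return len(counter)
-- ===== SOURCE B (Python) =====
-- def solution(k, tangerine):
--     # Bucket sizes by their frequency and walk counts from the maximum downward (no sort).
--     counter = {}
--     for x in tangerine:
--         counter[x] = counter.get(x, 0) + 1
--     if not counter: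
--         return 0
--     m = max(counter.values())
--     bucket = {}
--     for c in counter.values():
--         bucket[c] = bucket.get(c, 0) + 1
--     g = 0
--     s = 0
--     for c in range(m, 0, -1):
--         for _ in range(bucket.get(c, 0)):
--             g += 1
--             s += c
--             if s >= k:
--                 return g
--     return g
-- ===== Notes on version B (the rewrite author's own statement) =====
-- stated objective: alternative
-- what changed: B replaces Counter.most_common()'s sort-then-scan with frequency bucketing: it counts how many sizes have each count and walks counts from the maximum downward, so no sort is performed.
import Mathlib
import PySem

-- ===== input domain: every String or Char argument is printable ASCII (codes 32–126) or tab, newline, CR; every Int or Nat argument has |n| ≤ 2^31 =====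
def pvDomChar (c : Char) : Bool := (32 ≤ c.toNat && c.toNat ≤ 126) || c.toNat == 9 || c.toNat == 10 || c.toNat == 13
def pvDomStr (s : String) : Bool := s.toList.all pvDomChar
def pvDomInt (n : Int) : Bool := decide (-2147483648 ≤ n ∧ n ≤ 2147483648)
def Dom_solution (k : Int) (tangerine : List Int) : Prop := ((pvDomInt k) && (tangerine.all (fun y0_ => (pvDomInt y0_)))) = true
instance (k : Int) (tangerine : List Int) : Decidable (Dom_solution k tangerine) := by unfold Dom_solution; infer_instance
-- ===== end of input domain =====

-- B buckets sizes by their count and walks counts from the maximum downward instead of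
-- sorting the counter's items (alternative decomposition; same return value everywhere).

-- ===== PORT A =====
-- the early-returning 'for i, (_, n) in enumerate(counter.most_common())' loop;
-- none = fell through the loop.  most_common() = sorted(items, key=itemgetter(1), reverse=True).
def solutionLoop (k : Int) : List (Int × Int) → Int → Int → Option Int
  | [], _count, _i => none
  | (_, n) :: rest, count, i =>
      let count := count + n
      if k ≤ count then some (i + 1) else solutionLoop k rest count (i + 1)

def solution (k : Int) (tangerine : List Int) : Int :=
  let counter := PySem.Dict.counter tangerine
  match solutionLoop k (PySem.List.sorted counter.items (fun p => p.2) true) 0 0 with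
  | some r => r
  | none => counter.size

-- ===== PORT B =====
-- inner 'for _ in range(bucket.get(c, 0))' loop; .inl r = early return, .inr = updated (g, s)
def solutionAltInner (k c : Int) : Nat → Int → Int → Sum Int (Int × Int)
  | 0, g, s => .inr (g, s)
  | t + 1, g, s =>
      let g := g + 1
      let s := s + c
      if k ≤ s then .inl g else solutionAltInner k c t g s

-- outer 'for c in range(m, 0, -1)' loop (range(t) with t ≥ 0 iterates t.toNat times)
def solutionAltOuter (k : Int) (bucket : PySem.Dict Int Int) : List Int → Int → Int → Int
  | [], g, _s => g
  | c :: cs, g, s =>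
      match solutionAltInner k c (bucket.getD c 0).toNat g s with
      | .inl r => r
      | .inr gs => solutionAltOuter k bucket cs gs.1 gs.2

def solution_alt (k : Int) (tangerine : List Int) : Int :=
  let counter := tangerine.foldl (fun d x => d.insert x (d.getD x 0 + 1)) PySem.Dict.empty
  if counter.items = [] then 0
  else
    match PySem.List.max? counter.values (fun v => v) with
    | none => 0   -- unreachable: counter is non-empty here
    | some m =>
      let bucket := counter.values.foldl (fun d c => d.insert c (d.getD c 0 + 1)) PySem.Dict.empty
      solutionAltOuter k bucket (PySem.List.pyRange m 0 (-1)) 0 0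

-- ===== PRECONDITION & SPEC =====
def Spec_solution (k : Int) (tangerine : List Int) (out : Int) : Prop := out = solution_alt k tangerine
instance (k : Int) (tangerine : List Int) (out : Int) : Decidable (Spec_solution k tangerine out) := by unfold Spec_solution; infer_instance

-- ===== CLAIM (what is proved, stated in full; the proofs are below) =====
def Claim_equal_solution : Prop := ∀ (k : Int) (tangerine : List Int), Dom_solution k tangerine → Spec_solution k tangerine (solution k tangerine)

-- ===== LEMMAS AND PROOFS =====

-- the common core: walk a list of counts, accumulating sum and group index
def walk (k : Int) : List Int → Int → Int → Option Int
  | [], _count, _i => none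
  | n :: rest, count, i =>
      if k ≤ count + n then some (i + 1) else walk k rest (count + n) (i + 1)

theorem solutionLoop_eq_walk (k : Int) (ps : List (Int × Int)) :
    ∀ count i, solutionLoop k ps count i = walk k (ps.map (·.2)) count i := by
  induction ps with
  | nil => intro count i; rfl
  | cons p rest ih =>
      intro count i
      obtain ⟨a, n⟩ := p
      simp only [solutionLoop, walk, List.map]
      split_ifs with h
      · rfl
      · exact ih _ _

theorem walk_append (k : Int) (xs : List Int) :
    ∀ ys count i, walk k (xs ++ ys) count i =
      match walk k xs count i with
      | some r => some r
      | none => walk k ys (count + xs.sum) (i + xs.length) := by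
  induction xs with
  | nil => intro ys count i; simp [walk]
  | cons x t ih =>
      intro ys count i
      simp only [List.cons_append, walk]
      split_ifs with h
      · rfl
      · rw [ih]
        have h1 : count + (x :: t).sum = (count + x) + t.sum := by
          simp [List.sum_cons]; ring
        have h2 : i + ((x :: t).length : Int) = (i + 1) + (t.length : Int) := by
          simp [List.length_cons]; ring
        rw [h1, h2]

theorem inner_eq_walk_replicate (k c : Int) :
    ∀ (t : Nat) (g s : Int), solutionAltInner k c t g s =
      match walk k (List.replicate t c) s g with
      | some r => .inl r
      | none => .inr (g + (t : Int), s + (t : Int) * c) := by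
  intro t
  induction t with
  | zero => intro g s; simp [solutionAltInner, walk, List.replicate]
  | succ t ih =>
      intro g s
      simp only [solutionAltInner, List.replicate, walk]
      split_ifs with h
      · rfl
      · rw [ih]
        have h1 : g + 1 + (t : Int) = g + ((t + 1 : Nat) : Int) := by push_cast; ring
        have h2 : s + c + (t : Int) * c = s + ((t + 1 : Nat) : Int) * c := by push_cast; ring
        rw [h1, h2]

theorem outer_eq_walk_flatMap (k : Int) (bucket : PySem.Dict Int Int) :
    ∀ (cs : List Int) (g s : Int),
      solutionAltOuter k bucket cs g s =
      match walk k (cs.flatMap (fun c => List.replicate (bucket.getD c 0).toNat c)) s g with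
      | some r => r
      | none => g + ((cs.flatMap (fun c => List.replicate (bucket.getD c 0).toNat c)).length : Int) := by
  intro cs
  induction cs with
  | nil => intro g s; simp [solutionAltOuter, walk]
  | cons c cs ih =>
      intro g s
      simp only [solutionAltOuter, List.flatMap_cons]
      rw [inner_eq_walk_replicate, walk_append]
      rcases hw : walk k (List.replicate (bucket.getD c 0).toNat c) s g with _ | r
      · simp only [ih]
        have hsum : (List.replicate (bucket.getD c 0).toNat c).sum
            = ((bucket.getD c 0).toNat : Int) * c := by
          simp [List.sum_replicate]
        rw [hsum, List.length_replicate]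
        rcases hw2 : walk k (cs.flatMap (fun c => List.replicate (bucket.getD c 0).toNat c))
            (s + ((bucket.getD c 0).toNat : Int) * c) (g + ((bucket.getD c 0).toNat : Int)) with _ | r2
        · simp only [List.length_append, List.length_replicate]
          push_cast; ring
        · rfl
      · simp

-- sum of a 0-at-all-but-one-element map over a Nodup list
theorem sum_map_ite_mem (x : Int) (F : Int → Nat) :
    ∀ (l : List Int), l.Nodup →
      (l.map (fun c => if c = x then F c else 0)).sum = if x ∈ l then F x else 0 := by
  intro l
  induction l with
  | nil => simp
  | cons c cs ih =>
      intro hnd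
      rcases List.nodup_cons.mp hnd with ⟨hc, hnd'⟩
      simp only [List.map_cons, List.sum_cons, ih hnd', List.mem_cons]
      by_cases hx : c = x
      · subst hx
        simp [hc]
      · have hx' : x ≠ c := fun h => hx h.symm
        simp [hx']
        exact fun h => absurd h hx

theorem flatMap_replicate_perm (vals : List Int) (m : Int)
    (hpos : ∀ v ∈ vals, 1 ≤ v) (hle : ∀ v ∈ vals, v ≤ m) :
    ((PySem.List.pyRange m 0 (-1)).flatMap (fun c => List.replicate (vals.count c) c)).Perm vals := by
  rw [List.perm_iff_count]
  intro x
  rw [List.count_flatMap]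
  have hnd : (PySem.List.pyRange m 0 (-1)).Nodup := by
    rw [PySem.List.pyRange_neg_one_eq_reverse]
    exact (List.nodup_reverse).mpr (PySem.List.nodup_pyRange_one _ _)
  have hmap : ((PySem.List.pyRange m 0 (-1)).map
        ((fun l => List.count x l) ∘ fun c => List.replicate (vals.count c) c)).sum
      = ((PySem.List.pyRange m 0 (-1)).map fun c => if c = x then vals.count c else 0).sum := by
    congr 1
    apply List.map_congr_left
    intro c _
    simp [List.count_replicate]
  rw [hmap, sum_map_ite_mem x (fun c => vals.count c) _ hnd]
  by_cases hx : x ∈ PySem.List.pyRange m 0 (-1)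
  · simp [hx]
  · simp only [hx, if_false]
    symm
    rw [List.count_eq_zero]
    intro hmem
    exact hx (by
      rw [PySem.List.mem_pyRange_neg_one]
      exact ⟨by have := hpos x hmem; omega, hle x hmem⟩)

theorem flatMap_replicate_sorted (n : Int → Nat) :
    ∀ (l : List Int), l.Pairwise (fun a b => b < a) →
      (l.flatMap (fun c => List.replicate (n c) c)).Pairwise (fun a b => b ≤ a) := by
  intro l
  induction l with
  | nil => simp
  | cons c cs ih =>
      intro hp
      rcases List.pairwise_cons.mp hp with ⟨hhead, htail⟩
      simp only [List.flatMap_cons]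
      rw [List.pairwise_append]
      refine ⟨List.pairwise_replicate.mpr (Or.inr le_rfl), ih htail, ?_⟩
      intro a ha b hb
      rcases List.mem_flatMap.mp hb with ⟨c', hc', hb'⟩
      have hbc' := List.eq_of_mem_replicate hb'
      have hac := List.eq_of_mem_replicate ha
      subst hbc'; subst hac
      exact le_of_lt (hhead _ hc')

theorem list_eq_of_perm_of_sorted_desc (l1 l2 : List Int)
    (hp : l1.Perm l2)
    (h1 : l1.Pairwise (fun a b => b ≤ a)) (h2 : l2.Pairwise (fun a b => b ≤ a)) :
    l1 = l2 := by
  apply PySem.List.eq_of_perm_of_pairwise_le_of_injective (fun x => -x) neg_injective hp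
  · exact h1.imp (by intro a b h; simpa using h)
  · exact h2.imp (by intro a b h; simpa using h)

theorem solution_eq_alt (k : Int) (xs : List Int) : solution k xs = solution_alt k xs := by
  unfold solution solution_alt
  rw [PySem.Dict.foldl_insert_getD_add_one_eq_counter]
  set counter := PySem.Dict.counter xs with hcounter
  by_cases hemp : counter.items = []
  · -- empty counter: A's sorted list is empty, the loop returns none, size = 0
    have hs : PySem.List.sorted counter.items (fun p => p.2) true = [] := by
      rw [hemp]; rfl
    simp only [hemp]
    simp [PySem.Dict.size, hemp]
    rfl
  · simp only [hemp, if_false]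
    have hvals : counter.values ≠ [] := by
      simp only [PySem.Dict.values]
      intro h
      exact hemp (List.map_eq_nil_iff.mp h)
    rcases hmax : PySem.List.max? counter.values (fun v => v) with _ | m
    · exact absurd ((PySem.List.max?_eq_none_iff _ _).mp hmax) hvals
    · dsimp only
      rw [PySem.Dict.foldl_insert_getD_add_one_eq_counter]
      -- element facts about the values of a counter
      have hposle : ∀ v ∈ counter.values, 1 ≤ v ∧ v ≤ m := by
        intro v hv
        constructor
        · have : counter.values = (PySem.Set.ofList xs).map (fun y => (xs.count y : Int)) := by
            simp only [PySem.Dict.values, hcounter, PySem.Dict.items_counter, List.map_map]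
            rfl
          rw [this] at hv
          rcases List.mem_map.mp hv with ⟨y, hy, rfl⟩
          have : y ∈ xs := (PySem.Set.mem_ofList _ _).mp hy
          have := List.count_pos_iff.mpr this
          omega
        · exact PySem.List.max?_isMax hmax v hv
      -- the two count lists agree
      set LA := (PySem.List.sorted counter.items (fun p => p.2) true).map (·.2) with hLA
      set LB := (PySem.List.pyRange m 0 (-1)).flatMap
          (fun c => List.replicate ((PySem.Dict.counter counter.values).getD c 0).toNat c) with hLB
      have hLB' : LB = (PySem.List.pyRange m 0 (-1)).flatMap
          (fun c => List.replicate (counter.values.count c) c) := by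
        rw [hLB]
        congr 1
        funext c
        rw [PySem.Dict.getD_counter]
        simp
      have hpermA : LA.Perm counter.values := by
        have := PySem.List.sorted_perm counter.items (fun p => p.2) true
        simpa only [PySem.Dict.values] using this.map (·.2)
      have hpermB : LB.Perm counter.values := by
        rw [hLB']
        exact flatMap_replicate_perm counter.values m
          (fun v hv => (hposle v hv).1) (fun v hv => (hposle v hv).2)
      have hsortA : LA.Pairwise (fun a b => b ≤ a) := by
        rw [hLA, List.pairwise_map]
        exact PySem.List.sorted_pairwise_rev counter.items (fun p => p.2)
      have hsortB : LB.Pairwise (fun a b => b ≤ a) := by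
        rw [hLB']
        apply flatMap_replicate_sorted
        rw [PySem.List.pyRange_neg_one_eq_reverse, List.pairwise_reverse]
        exact (PySem.List.pairwise_lt_pyRange_one 1 (m + 1)).imp (fun h => h)
      have hAB : LA = LB := list_eq_of_perm_of_sorted_desc LA LB
        (hpermA.trans hpermB.symm) hsortA hsortB
      -- both sides through the common walk
      rw [solutionLoop_eq_walk, ← hLA, outer_eq_walk_flatMap, ← hLB, hAB]
      rcases hw : walk k LB 0 0 with _ | r
      · have hlen : (LB.length : Int) = counter.size := by
          rw [← hAB, hLA]
          simp [PySem.Dict.size, PySem.List.length_sorted]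
        simp [hlen]
      · simp

-- ===== VERDICT (by name: the statement is the Claim_ definition above) =====
theorem solution_spec : Claim_equal_solution := by
  intro k tangerine _hdom
  exact solution_eq_alt k tangerine
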